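-- pv_equiv track=rewrite | github.com/chuksoo/CodeMasters | TIP102 - Intermediate Technical Interview Prep/Unit 2 practice.py | max_audience_performances
-- ===== SOURCE A (Python) =====
-- def max_audience_performances(audiences):
--     max_num = -9999
--     count = 0
--     for num in audiences:
--         if num > max_num:
--             max_num = num
--             count = 1
--         elif num == max_num:
--             count += 1
--     return count * max_num
-- ===== SOURCE B (Python) =====
-- def max_audience_performances(audiences):
--     # Pass 1: running maximum against the same -9999 sentinel as A.
--     max_num = -9999
--     for num in audiences:
--         if num > max_num:
--             max_num = num
--     # Pass 2: count occurrences of that maximum.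
--     return audiences.count(max_num) * max_num
-- ===== Notes on version B (the rewrite author's own statement) =====
-- stated objective: alternative
-- what changed: Replaces A's single interleaved max-and-count pass (with count resets) by two distinct passes: a plain running-maximum fold, then list.count of that maximum.
import Mathlib
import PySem

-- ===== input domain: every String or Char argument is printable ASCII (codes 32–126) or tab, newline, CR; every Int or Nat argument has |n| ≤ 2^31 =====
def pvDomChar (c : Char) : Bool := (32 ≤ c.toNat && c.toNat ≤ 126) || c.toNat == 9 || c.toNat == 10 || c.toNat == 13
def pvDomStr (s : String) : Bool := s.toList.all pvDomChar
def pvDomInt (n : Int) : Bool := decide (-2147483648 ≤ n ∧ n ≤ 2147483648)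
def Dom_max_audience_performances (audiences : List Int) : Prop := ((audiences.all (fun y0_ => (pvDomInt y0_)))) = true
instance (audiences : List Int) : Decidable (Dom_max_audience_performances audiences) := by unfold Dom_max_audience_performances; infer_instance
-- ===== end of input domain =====

-- B replaces A's single interleaved max-and-count pass by two distinct passes
-- (a running-maximum fold, then list.count of that maximum): alternative decomposition, same cost.

-- ===== PORT A =====
-- A's loop body: one interleaved step updating (max_num, count).
def pvStepA (p : Int × Int) (num : Int) : Int × Int :=
  if num > p.1 then (num, 1)
  else if num == p.1 then (p.1, p.2 + 1)
  else p

def max_audience_performances (audiences : List Int) : Int :=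
  let s := audiences.foldl pvStepA (-9999, 0)
  s.2 * s.1

-- ===== PORT B =====
-- B's first pass: plain running maximum with the -9999 start value.
def pvStepB (m : Int) (num : Int) : Int :=
  if num > m then num else m

def max_audience_performances_alt (audiences : List Int) : Int :=
  let m := audiences.foldl pvStepB (-9999)
  ((PySem.List.count audiences m : Nat) : Int) * m

-- ===== PRECONDITION & SPEC =====
def Spec_max_audience_performances (audiences : List Int) (out : Int) : Prop := out = max_audience_performances_alt audiences
instance (audiences : List Int) (out : Int) : Decidable (Spec_max_audience_performances audiences out) := by unfold Spec_max_audience_performances; infer_instance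

-- ===== CLAIM (what is proved, stated in full; the proofs are below) =====
def Claim_equal_max_audience_performances : Prop := ∀ (audiences : List Int), Dom_max_audience_performances audiences → Spec_max_audience_performances audiences (max_audience_performances audiences)

-- ===== LEMMAS AND PROOFS =====

-- the running maximum never decreases below its start value
lemma pv_le_foldB : ∀ (l : List Int) (m : Int), m ≤ l.foldl pvStepB m := by
  intro l
  induction l with
  | nil => intro m; simp
  | cons x l ih =>
      intro m
      simp only [List.foldl_cons, pvStepB]
      split
      · exact le_trans (le_of_lt (by omega)) (ih x)
      · exact ih m

-- invariant: A's interleaved fold from (m, c) yields the running maximum M together with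
-- (c + count of m) when the maximum stays m, and the count of M in the remaining list otherwise.
lemma pv_foldA_eq : ∀ (l : List Int) (m c : Int),
    l.foldl pvStepA (m, c) =
      (l.foldl pvStepB m,
       if l.foldl pvStepB m = m then c + (l.count m : Int) else (l.count (l.foldl pvStepB m) : Int)) := by
  intro l
  induction l with
  | nil => intro m c; simp
  | cons x l ih =>
      intro m c
      simp only [List.foldl_cons, pvStepA, pvStepB]
      by_cases hgt : x > m
      · simp only [if_pos hgt]; rw [ih x 1]
        have hxM : x ≤ l.foldl pvStepB x := pv_le_foldB l x
        have hMm : l.foldl pvStepB x ≠ m := by omega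
        rw [if_neg hMm]
        congr 1
        by_cases hMx : l.foldl pvStepB x = x
        · rw [if_pos hMx, hMx, List.count_cons_self]
          push_cast; ring
        · rw [if_neg hMx, List.count_cons_of_ne (fun h => hMx h.symm)]
      · by_cases heq : x = m
        · simp only [if_neg hgt]; rw [
              if_pos (show (x == m) = true by simp [heq]), ih m (c + 1)]
          congr 1
          by_cases hMm : l.foldl pvStepB m = m
          · rw [if_pos hMm, if_pos hMm, heq, List.count_cons_self]
            push_cast; ring
          · rw [if_neg hMm, if_neg hMm,
                List.count_cons_of_ne (show x ≠ l.foldl pvStepB m by rw [heq]; exact fun h => hMm h.symm)]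
        · simp only [if_neg hgt]; rw [
              if_neg (show ¬ (x == m) = true by simp [heq]), ih m c]
          have hmM : m ≤ l.foldl pvStepB m := pv_le_foldB l m
          congr 1
          by_cases hMm : l.foldl pvStepB m = m
          · rw [if_pos hMm, if_pos hMm, List.count_cons_of_ne heq]
          · rw [if_neg hMm, if_neg hMm,
                List.count_cons_of_ne (show x ≠ l.foldl pvStepB m by omega)]

-- ===== VERDICT (by name: the statement is the Claim_ definition above) =====
theorem max_audience_performances_spec : Claim_equal_max_audience_performances := by
  intro audiences _
  show _ = _
  unfold max_audience_performances max_audience_performances_alt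
  rw [pv_foldA_eq audiences (-9999) 0]
  simp only [PySem.List.count]
  split <;> simp_all
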